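-- pv_equiv track=rewrite | github.com/martinmateos2001/Guias-de-ejercicios-de-AyED-1-main | Ejercicios resueltos/Python/Parciales/2C2023/Solucion.py | acomodar
-- ===== SOURCE A (Python) =====
-- def copiar_lista(ls:list) -> list:
--     res:list = []
--     for i in range(len(ls)):
--         res.append(ls[i])
--     return res
--
-- def acomodar(ls:'list[str]') -> 'list[str]':
--     res:'list[str]' = []
--     copia:'list[str]' = copiar_lista(ls)
--     lla_ls:'list[str]' = []
--     up_ls:'list[str]' = []
--     for e in copia:
--         if e == "UP":
--             lla_ls.append(e)
--         else:
--             up_ls.append(e)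
--     res = lla_ls + up_ls
--     return res
-- ===== SOURCE B (Python) =====
-- def acomodar(ls: 'list[str]') -> 'list[str]':
--     return sorted(ls, key=lambda e: e != "UP")
-- ===== Notes on version B (the rewrite author's own statement) =====
-- stated objective: idiomatic
-- what changed: Replaced the copy-then-partition-into-two-lists loop by a single stable sort on the boolean key (e != "UP"), which puts all "UP" elements first while preserving relative order.
import Mathlib
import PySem

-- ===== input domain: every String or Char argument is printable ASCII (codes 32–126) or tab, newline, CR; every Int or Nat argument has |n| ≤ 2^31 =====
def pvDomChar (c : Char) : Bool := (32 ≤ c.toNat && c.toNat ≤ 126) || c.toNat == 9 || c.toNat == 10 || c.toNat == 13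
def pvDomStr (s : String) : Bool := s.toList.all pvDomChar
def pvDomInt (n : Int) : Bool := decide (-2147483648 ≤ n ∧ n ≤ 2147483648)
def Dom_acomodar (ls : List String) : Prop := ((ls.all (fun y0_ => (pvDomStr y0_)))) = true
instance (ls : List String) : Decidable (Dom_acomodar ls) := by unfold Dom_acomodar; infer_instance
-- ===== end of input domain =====

-- B replaces A's copy-then-partition loop by one stable sort on the key (e != "UP"); same return value, no argument mutation in either.

-- ===== PORT A =====
-- helper: copiar_lista — index loop appending ls[i] (index always in range, so getD's default is never used)
def copiar_lista (ls : List String) : List String :=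
  (PySem.List.pyRange 0 (ls.length : Int)).foldl
    (fun res i => res ++ [PySem.List.pyGetD ls i ""]) []

def acomodar (ls : List String) : List String :=
  let copia := copiar_lista ls
  let p := copia.foldl
    (fun (p : List String × List String) e =>
      if e = "UP" then (p.1 ++ [e], p.2) else (p.1, p.2 ++ [e]))
    ([], [])
  p.1 ++ p.2

-- ===== PORT B =====
def acomodar_alt (ls : List String) : List String :=
  PySem.List.sorted ls (fun e => (decide (e ≠ "UP") : Bool)) false

-- ===== PRECONDITION & SPEC =====
def Spec_acomodar (ls : List String) (out : List String) : Prop := out = acomodar_alt ls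
instance (ls : List String) (out : List String) : Decidable (Spec_acomodar ls out) := by unfold Spec_acomodar; infer_instance

-- ===== CLAIM (what is proved, stated in full; the proofs are below) =====
def Claim_equal_acomodar : Prop := ∀ (ls : List String), Dom_acomodar ls → Spec_acomodar ls (acomodar ls)

-- ===== LEMMAS AND PROOFS =====

theorem copiar_lista_eq (ls : List String) : copiar_lista ls = ls := by
  unfold copiar_lista
  rw [PySem.List.foldl_pyRange_zero_pyGetD' ls "" (fun res e => res ++ [e]) []]
  rw [PySem.List.foldl_append_eq_flatMap (fun e => [e]) ls []]
  simp

-- A's partition loop, with general accumulators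
theorem acomodar_loop (ls : List String) (a b : List String) :
    ls.foldl (fun (p : List String × List String) e =>
      if e = "UP" then (p.1 ++ [e], p.2) else (p.1, p.2 ++ [e])) (a, b)
    = (a ++ ls.filter (fun e => decide (e = "UP")),
       b ++ ls.filter (fun e => decide (¬ e = "UP"))) := by
  induction ls generalizing a b with
  | nil => simp
  | cons x xs ih =>
    by_cases hx : x = "UP" <;> simp [hx, ih]

-- insertBy of an "UP" element goes right after the "UP" block
theorem insertBy_up (U R : List String)
    (hU : ∀ y ∈ U, y = "UP") (hR : ∀ y ∈ R, y ≠ "UP") :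
    PySem.List.insertBy
      (fun a b => decide ((decide (a ≠ "UP") : Bool) < (decide (b ≠ "UP") : Bool)))
      "UP" (U ++ R) = U ++ "UP" :: R := by
  induction U with
  | nil =>
    cases R with
    | nil => rfl
    | cons r rs =>
      have hr := hR r (by simp)
      simp [PySem.List.insertBy, hr]
  | cons u us ih =>
    have hu := hU u (by simp)
    subst hu
    rw [List.cons_append]
    have h1 : PySem.List.insertBy
        (fun a b => decide ((decide (a ≠ "UP") : Bool) < (decide (b ≠ "UP") : Bool)))
        "UP" ("UP" :: (us ++ R))
        = "UP" :: PySem.List.insertBy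
        (fun a b => decide ((decide (a ≠ "UP") : Bool) < (decide (b ≠ "UP") : Bool)))
        "UP" (us ++ R) := by
      simp only [PySem.List.insertBy]
      rw [if_neg (by decide)]
    rw [h1, ih (fun y hy => hU y (by simp [hy])), List.cons_append]

-- B's insertion sort, characterised as the stable partition
theorem sorted_eq_partition (ls : List String) :
    acomodar_alt ls
    = ls.filter (fun e => decide (e = "UP")) ++ ls.filter (fun e => decide (¬ e = "UP")) := by
  unfold acomodar_alt
  rw [PySem.List.sorted_eq_foldl_insertBy]
  induction ls using List.reverseRecOn with
  | nil => rfl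
  | append_singleton xs x ih =>
    rw [List.foldl_append, List.foldl_cons, List.foldl_nil, ih]
    by_cases hx : x = "UP"
    · subst hx
      rw [insertBy_up]
      · simp [List.filter_append]
      · intro y hy; simpa using (List.of_mem_filter hy)
      · intro y hy; simpa using (List.of_mem_filter hy)
    · rw [PySem.List.insertBy_of_forall_not_before]
      · simp [List.filter_append, hx]
      · intro y hy
        simp only [List.mem_append] at hy
        rcases hy with hy | hy
        · have := List.of_mem_filter hy
          simp at this
          simp [hx, this]
        · simp [hx]

-- ===== VERDICT (by name: the statement is the Claim_ definition above) =====
theorem acomodar_spec : Claim_equal_acomodar := by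
  intro ls _
  show acomodar ls = acomodar_alt ls
  rw [sorted_eq_partition]
  simp only [acomodar, copiar_lista_eq, acomodar_loop, List.nil_append]
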